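-- pv_equiv track=rewrite | github.com/SNB220/SNB-pcap-analyzer | pcap_analyzer.py | analyze_dns_patterns
-- ===== SOURCE A (Python) =====
-- from collections import defaultdict, Counter
--
-- def analyze_dns_patterns(dns_queries):
--     """Analyze DNS queries for potential tunneling"""
--     domain_stats = Counter()
--     suspicious_dns = []
--
--     for src, dst, query, qtype in dns_queries:
--         if qtype == "Query" and query != "Response":
--             domain_stats[query] += 1
--
--             # Check for suspicious patterns
--             if len(query) > 50:  # Very long domain names
--                 suspicious_dns.append((src, dst, query, "Unusually long domain name"))
--             elif query.count('.') > 10:  # Too many subdomains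
--                 suspicious_dns.append((src, dst, query, "Excessive subdomains"))
--             elif any(char in query for char in ['0', '1', '2', '3', '4', '5', '6', '7', '8', '9']) and len(query) > 20:
--                 suspicious_dns.append((src, dst, query, "Potential DNS tunneling"))
--
--     return domain_stats.most_common(10), suspicious_dns
-- ===== SOURCE B (Python) =====
-- def analyze_dns_patterns(dns_queries):
--     """Analyze DNS queries for potential tunneling"""
--     queries = [(s, d, q) for s, d, q, t in dns_queries if t == "Query" and q != "Response"]
--     names = [q for _, _, q in queries]
--     # tally without Counter: distinct names in first-seen order, each counted by scanning
--     stats = [(q, names.count(q)) for q in dict.fromkeys(names)]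
--     # top 10 by repeated selection of the first maximum (no sort)
--     top = []
--     while stats and len(top) < 10:
--         best = max(stats, key=lambda p: p[1])
--         top.append(best)
--         stats.remove(best)
--     rules = [
--         (lambda q: len(q) > 50, "Unusually long domain name"),
--         (lambda q: q.count('.') > 10, "Excessive subdomains"),
--         (lambda q: any(c in q for c in "0123456789") and len(q) > 20, "Potential DNS tunneling"),
--     ]
--     suspicious = []
--     for s, d, q in queries:
--         reason = next((label for test, label in rules if test(q)), None)
--         if reason is not None:
--             suspicious.append((s, d, q, reason))
--     return top, suspicious
-- ===== Notes on version B (the rewrite author's own statement) =====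
-- stated objective: alternative
-- what changed: Replaces Counter + most_common's stable sort by a dedup-and-scan tally (each distinct name counted with list.count) and a repeated first-maximum selection loop for the top 10, and drives the suspicion checks from an ordered rules table instead of an inline elif chain.
import Mathlib
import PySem

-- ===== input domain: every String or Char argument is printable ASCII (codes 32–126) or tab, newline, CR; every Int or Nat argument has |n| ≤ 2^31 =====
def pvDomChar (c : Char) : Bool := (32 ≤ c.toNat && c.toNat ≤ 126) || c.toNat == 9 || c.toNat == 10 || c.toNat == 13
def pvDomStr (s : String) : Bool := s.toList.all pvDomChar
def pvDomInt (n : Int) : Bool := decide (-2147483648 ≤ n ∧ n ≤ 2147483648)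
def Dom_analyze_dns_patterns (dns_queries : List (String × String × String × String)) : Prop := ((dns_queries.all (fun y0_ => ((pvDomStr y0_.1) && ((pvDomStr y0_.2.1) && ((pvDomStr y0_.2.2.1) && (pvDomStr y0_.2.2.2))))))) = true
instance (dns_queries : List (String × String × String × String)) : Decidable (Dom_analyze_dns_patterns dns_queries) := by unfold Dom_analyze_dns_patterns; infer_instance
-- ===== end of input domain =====

-- B replaces Counter + most_common by a dedup-and-count tally and a repeated
-- first-maximum selection for the top 10, and drives the suspicion checks from a
-- rules table; objective: alternative (no Counter, no sort).

-- ===== PORT A =====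
-- single fold carrying (Counter, suspicious list), exactly A's combined loop
def analyze_dns_patterns (dns_queries : List (String × String × String × String)) : (List (String × Int)) × (List (String × String × String × String)) :=
  let st := dns_queries.foldl
    (fun (st : PySem.Dict String Int × List (String × String × String × String)) x =>
      let src := x.1; let dst := x.2.1; let query := x.2.2.1; let qtype := x.2.2.2
      if qtype == "Query" && !(query == "Response") then
        let d := st.1.modify query 0 (· + 1)
        let s :=
          if PySem.Str.len query > 50 then
            st.2 ++ [(src, dst, query, "Unusually long domain name")]
          else if PySem.Str.count query "." > 10 then
            st.2 ++ [(src, dst, query, "Excessive subdomains")]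
          else if (["0","1","2","3","4","5","6","7","8","9"] : List String).any
                    (fun c => PySem.Str.isIn c query) && PySem.Str.len query > 20 then
            st.2 ++ [(src, dst, query, "Potential DNS tunneling")]
          else st.2
        (d, s)
      else st)
    (PySem.Dict.empty, [])
  -- Counter.most_common(10) = stable sort by count, descending, first 10
  ((PySem.List.sorted st.1.items (fun p => p.2) true).take 10, st.2)

-- ===== PORT B =====
-- B's ordered rules table: (test, label)
def dnsRules : List ((String → Bool) × String) :=
  [(fun q => PySem.Str.len q > 50, "Unusually long domain name"),
   (fun q => PySem.Str.count q "." > 10, "Excessive subdomains"),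
   (fun q => (["0","1","2","3","4","5","6","7","8","9"] : List String).any
               (fun c => PySem.Str.isIn c q) && PySem.Str.len q > 20,
    "Potential DNS tunneling")]

-- B's while-loop: repeatedly take the first maximum-count pair and remove it (fuel = 10)
def pickTop : Nat → List (String × Int) → List (String × Int)
  | 0, _ => []
  | k + 1, xs =>
    match PySem.List.max? xs (fun p => p.2) with
    | none => []          -- 'while stats' : remaining list empty, stop
    | some best =>
      match PySem.List.remove? xs best with
      | none => []        -- unreachable: best ∈ xs
      | some rest => best :: pickTop k rest

def analyze_dns_patterns_alt (dns_queries : List (String × String × String × String)) : (List (String × Int)) × (List (String × String × String × String)) :=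
  let queries := (dns_queries.filter
      (fun x => x.2.2.2 == "Query" && !(x.2.2.1 == "Response"))).map
      (fun x => (x.1, x.2.1, x.2.2.1))
  let names := queries.map (fun x => x.2.2)
  -- tally without Counter: distinct names (dict.fromkeys order), each counted by scanning
  let stats := (PySem.List.dedup names).map (fun q => (q, (names.count q : Int)))
  let top := pickTop 10 stats
  let suspicious := queries.foldl
    (fun acc x =>
      match (dnsRules.find? (fun r => r.1 x.2.2)).map (fun r => r.2) with
      | some reason => acc ++ [(x.1, x.2.1, x.2.2, reason)]
      | none => acc) []
  (top, suspicious)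

-- ===== PRECONDITION & SPEC =====
def Spec_analyze_dns_patterns (dns_queries : List (String × String × String × String)) (out : (List (String × Int)) × (List (String × String × String × String))) : Prop := out = analyze_dns_patterns_alt dns_queries
instance (dns_queries : List (String × String × String × String)) (out : (List (String × Int)) × (List (String × String × String × String))) : Decidable (Spec_analyze_dns_patterns dns_queries out) := by unfold Spec_analyze_dns_patterns; infer_instance

-- ===== CLAIM (what is proved, stated in full; the proofs are below) =====
def Claim_equal_analyze_dns_patterns : Prop := ∀ (dns_queries : List (String × String × String × String)), Dom_analyze_dns_patterns dns_queries → Spec_analyze_dns_patterns dns_queries (analyze_dns_patterns dns_queries)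

-- ===== LEMMAS AND PROOFS =====

-- the rules-table lookup is A's elif chain
theorem find_rules (q : String) :
    (dnsRules.find? (fun r => r.1 q)).map (fun r => r.2)
      = (if PySem.Str.len q > 50 then some "Unusually long domain name"
         else if PySem.Str.count q "." > 10 then some "Excessive subdomains"
         else if (["0","1","2","3","4","5","6","7","8","9"] : List String).any
                   (fun c => PySem.Str.isIn c q) && PySem.Str.len q > 20 then
           some "Potential DNS tunneling"
         else none) := by
  simp only [dnsRules, List.find?]
  by_cases h1 : PySem.Str.len q > 50
  · rw [if_pos h1, decide_eq_true h1]; rfl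
  · rw [if_neg h1, decide_eq_false h1]
    by_cases h2 : PySem.Str.count q "." > 10
    · rw [if_pos h2, decide_eq_true h2]; rfl
    · rw [if_neg h2, decide_eq_false h2]
      by_cases h3 : ((["0","1","2","3","4","5","6","7","8","9"] : List String).any
          (fun c => PySem.Str.isIn c q) && decide (PySem.Str.len q > 20)) = true
      · rw [if_pos h3, h3]; rfl
      · rw [if_neg h3, Bool.eq_false_iff.mpr h3]; rfl

-- A's combined loop from any start state = counting fold over the filtered names
-- paired with B's rules-table fold over the filtered triples
theorem loop_decomposes (xs : List (String × String × String × String))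
    (d : PySem.Dict String Int) (acc : List (String × String × String × String)) :
    xs.foldl
      (fun (st : PySem.Dict String Int × List (String × String × String × String)) x =>
        let src := x.1; let dst := x.2.1; let query := x.2.2.1; let qtype := x.2.2.2
        if qtype == "Query" && !(query == "Response") then
          let d := st.1.modify query 0 (· + 1)
          let s :=
            if PySem.Str.len query > 50 then
              st.2 ++ [(src, dst, query, "Unusually long domain name")]
            else if PySem.Str.count query "." > 10 then
              st.2 ++ [(src, dst, query, "Excessive subdomains")]
            else if (["0","1","2","3","4","5","6","7","8","9"] : List String).any
                      (fun c => PySem.Str.isIn c query) && PySem.Str.len query > 20 then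
              st.2 ++ [(src, dst, query, "Potential DNS tunneling")]
            else st.2
          (d, s)
        else st)
      (d, acc)
    = (((xs.filter (fun x => x.2.2.2 == "Query" && !(x.2.2.1 == "Response"))).map
          (fun x => x.2.2.1)).foldl (fun d k => d.modify k 0 (· + 1)) d,
       ((xs.filter (fun x => x.2.2.2 == "Query" && !(x.2.2.1 == "Response"))).map
          (fun x => (x.1, x.2.1, x.2.2.1))).foldl
        (fun acc x =>
          match (dnsRules.find? (fun r => r.1 x.2.2)).map (fun r => r.2) with
          | some reason => acc ++ [(x.1, x.2.1, x.2.2, reason)]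
          | none => acc) acc) := by
  induction xs generalizing d acc with
  | nil => simp
  | cons x xs ih =>
    simp only [List.foldl_cons, List.filter_cons]
    by_cases h : (x.2.2.2 == "Query" && !(x.2.2.1 == "Response")) = true
    · simp only [h, if_pos, List.map_cons, List.foldl_cons]
      rw [ih, find_rules]
      split_ifs <;> simp
    · simp only [h, if_neg, Bool.false_eq_true, not_false_iff]
      rw [ih]

theorem max?_snoc (ys : List (String × Int)) (x : String × Int) :
    PySem.List.max? (ys ++ [x]) (fun p => p.2)
      = some (match PySem.List.max? ys (fun p => p.2) with
              | none => x
              | some m => if m.2 < x.2 then x else m) := by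
  simp only [PySem.List.max?, List.foldl_append, List.foldl_cons, List.foldl_nil]
  generalize List.foldl _ none ys = r
  cases r with
  | none => rfl
  | some m => by_cases h : m.2 < x.2 <;> simp [h]

theorem sorted_snoc (ys : List (String × Int)) (x : String × Int) :
    PySem.List.sorted (ys ++ [x]) (fun p => p.2) true
      = PySem.List.insertBy (fun a b => decide (b.2 < a.2)) x
          (PySem.List.sorted ys (fun p => p.2) true) := by
  rw [PySem.List.sorted_rev_eq_foldl_insertBy, PySem.List.sorted_rev_eq_foldl_insertBy,
      List.foldl_append]
  rfl

theorem insertBy_front (x : String × Int) (ys : List (String × Int))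
    (h : ∀ y ∈ ys, y.2 < x.2) :
    PySem.List.insertBy (fun a b => decide (b.2 < a.2)) x ys = x :: ys := by
  cases ys with
  | nil => rfl
  | cons y t => simp [PySem.List.insertBy, h y (List.mem_cons_self)]

-- the head of the stable descending sort is the FIRST maximum, and the tail sorts the rest
theorem sorted_rev_eq_max_cons (xs : List (String × Int)) (m : String × Int)
    (hm : PySem.List.max? xs (fun p => p.2) = some m) :
    PySem.List.sorted xs (fun p => p.2) true
      = m :: PySem.List.sorted (xs.erase m) (fun p => p.2) true := by
  induction xs using List.reverseRecOn generalizing m with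
  | nil => simp [PySem.List.max?] at hm
  | append_singleton ys x ih =>
    rw [max?_snoc] at hm
    cases hys : PySem.List.max? ys (fun p => p.2) with
    | none =>
      have : ys = [] := (PySem.List.max?_eq_none_iff _ _).mp hys
      subst this
      simp only [hys] at hm
      cases hm
      simp [PySem.List.sorted, PySem.List.insertBy]
    | some m' =>
      simp only [hys] at hm
      by_cases hlt : m'.2 < x.2
      · rw [if_pos hlt] at hm
        cases hm
        have hx_not : x ∉ ys := by
          intro hmem
          exact absurd (PySem.List.max?_isMax hys x hmem) (by omega)
        rw [List.erase_append_right _ hx_not]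
        simp only [List.erase_cons_head, List.append_nil]
        rw [sorted_snoc]
        refine insertBy_front _ _ ?_
        intro y hy
        have hy' : y ∈ ys := (PySem.List.mem_sorted _ _ _ _).mp hy
        have := PySem.List.max?_isMax hys y hy'
        omega
      · rw [if_neg hlt] at hm
        cases hm
        have hmem : m ∈ ys := PySem.List.max?_mem hys
        rw [List.erase_append_left _ hmem, sorted_snoc, ih m hys, sorted_snoc]
        simp [PySem.List.insertBy, hlt]

-- B's selection loop computes the first k elements of the stable descending sort
theorem pickTop_eq_take_sorted (k : Nat) (xs : List (String × Int)) :
    pickTop k xs = (PySem.List.sorted xs (fun p => p.2) true).take k := by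
  induction k generalizing xs with
  | zero => simp [pickTop]
  | succ k ih =>
    cases hm : PySem.List.max? xs (fun p => p.2) with
    | none =>
      have : xs = [] := (PySem.List.max?_eq_none_iff _ _).mp hm
      subst this
      rfl
    | some m =>
      have hmem : m ∈ xs := PySem.List.max?_mem hm
      rw [sorted_rev_eq_max_cons xs m hm]
      simp only [pickTop, hm, PySem.List.remove?_eq_some_erase xs m hmem,
        List.take_succ_cons]
      rw [ih]

-- ===== VERDICT (by name: the statement is the Claim_ definition above) =====
theorem analyze_dns_patterns_spec : Claim_equal_analyze_dns_patterns := by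
  intro dns_queries _
  unfold Spec_analyze_dns_patterns analyze_dns_patterns analyze_dns_patterns_alt
  rw [loop_decomposes]
  dsimp only
  rw [pickTop_eq_take_sorted]
  simp [← PySem.Dict.counter_eq_foldl, PySem.Dict.items_counter,
    PySem.List.dedup_eq_ofList, List.map_map, Function.comp_def]
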